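-- pv_equiv track=rewrite | github.com/pypi-data/pypi-mirror-401 | packages/bqs/bqs-0.1.9.tar.gz/bqs-0.1.9/bqs/utils/qaoa_utils.py | _glue_slices
-- ===== SOURCE A (Python) =====
-- from itertools import product, chain
--
-- def _glue_slices(solutions: list[list[dict]]):
--
--     full_sols = []
--     for tuple_of_sols in product(*solutions):
--         sol = dict()
--         for slice_sol in tuple_of_sols:
--             sol.update(slice_sol)
--         full_sols.append(sol)
--
--     return full_sols
-- ===== SOURCE B (Python) =====
-- def _glue_slices(solutions: list[list[dict]]):
--     full_sols = [dict()]
--     for slice_list in solutions: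
--         full_sols = [{**partial, **s} for partial in full_sols for s in slice_list]
--     return full_sols
-- ===== Notes on version B (the rewrite author's own statement) =====
-- stated objective: alternative
-- what changed: Replaces itertools.product plus a per-tuple merge-from-scratch loop with an incremental fold that extends partial merged dicts one slice axis at a time, sharing prefix merge work.
import Mathlib
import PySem

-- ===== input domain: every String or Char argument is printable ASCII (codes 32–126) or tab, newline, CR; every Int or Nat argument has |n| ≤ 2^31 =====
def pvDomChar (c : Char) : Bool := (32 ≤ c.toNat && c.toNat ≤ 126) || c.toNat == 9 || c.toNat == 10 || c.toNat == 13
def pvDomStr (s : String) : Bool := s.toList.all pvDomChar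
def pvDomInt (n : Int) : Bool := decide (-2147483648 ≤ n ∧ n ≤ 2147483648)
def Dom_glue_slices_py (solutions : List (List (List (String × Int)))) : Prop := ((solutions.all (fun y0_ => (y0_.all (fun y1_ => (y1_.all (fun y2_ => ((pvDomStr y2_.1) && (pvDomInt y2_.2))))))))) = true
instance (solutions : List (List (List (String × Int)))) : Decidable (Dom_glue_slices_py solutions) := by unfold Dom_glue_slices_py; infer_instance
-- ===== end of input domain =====

-- B replaces itertools.product + per-tuple merge-from-scratch with an incremental fold
-- extending part merged dicts one slice axis at a time (alternative decomposition, same results).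

-- ===== PORT A =====
-- itertools.product(*solutions): last axis varies fastest
def pvProduct (ls : List (List (List (String × Int)))) : List (List (List (String × Int))) :=
  match ls with
  | [] => [[]]
  | xs :: rest => xs.flatMap (fun x => (pvProduct rest).map (fun t => x :: t))

def glue_slices_py (solutions : List (List (List (String × Int)))) : List (List (String × Int)) :=
  -- for tuple_of_sols in product(*solutions): sol = {}; for slice_sol in tuple: sol.update(slice_sol); append sol
  (pvProduct solutions).map (fun tup =>
    (tup.foldl (fun sol slice_sol => sol.update slice_sol) PySem.Dict.empty).items)

-- ===== PORT B =====
def glue_slices_py_alt (solutions : List (List (List (String × Int)))) : List (List (String × Int)) :=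
  -- full_sols = [{}]; for slice_list in solutions: full_sols = [{**part, **s} for part ... for s ...]
  (solutions.foldl
    (fun full_sols slice_list =>
      full_sols.flatMap (fun part => slice_list.map (fun s => part.update s)))
    [PySem.Dict.empty]).map (fun d => d.items)

-- ===== PRECONDITION & SPEC =====
def Spec_glue_slices_py (solutions : List (List (List (String × Int)))) (out : List (List (String × Int))) : Prop := out = glue_slices_py_alt solutions
instance (solutions : List (List (List (String × Int)))) (out : List (List (String × Int))) : Decidable (Spec_glue_slices_py solutions out) := by unfold Spec_glue_slices_py; infer_instance

-- ===== CLAIM (what is proved, stated in full; the proofs are below) =====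
def Claim_equal_glue_slices_py : Prop := ∀ (solutions : List (List (List (String × Int)))), Dom_glue_slices_py solutions → Spec_glue_slices_py solutions (glue_slices_py solutions)

-- ===== LEMMAS AND PROOFS =====

-- B's fold, started from any list of part dicts, yields each part extended by
-- every tuple of the remaining product (in A's order).
theorem pv_fold_eq_product (sols : List (List (List (String × Int))))
    (acc : List (PySem.Dict String Int)) :
    sols.foldl
      (fun full_sols slice_list =>
        full_sols.flatMap (fun part => slice_list.map (fun s => part.update s)))
      acc
    = acc.flatMap (fun d => (pvProduct sols).map
        (fun tup => tup.foldl (fun sol slice_sol => sol.update slice_sol) d)) := by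
  induction sols generalizing acc with
  | nil => simp [pvProduct]
  | cons sl rest ih =>
    simp only [List.foldl_cons, ih, pvProduct]
    rw [List.flatMap_assoc]
    congr 1
    funext d
    rw [List.flatMap_map, List.map_flatMap]
    congr 1
    funext s
    simp [List.map_map, Function.comp]

-- ===== VERDICT (by name: the statement is the Claim_ definition above) =====
theorem glue_slices_py_spec : Claim_equal_glue_slices_py := by
  intro solutions _
  unfold Spec_glue_slices_py glue_slices_py glue_slices_py_alt
  rw [pv_fold_eq_product]
  simp [List.map_map]
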